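-- pv_equiv track=rewrite | github.com/79gun79/Algorithm | 백준/Gold/1744. 수 묶기/수 묶기.py | mod_num
-- ===== SOURCE A (Python) =====
-- def mod_num(lst):
--     minus = []
--     plus = []
--     res = 0
--     for i in lst:
--         if i <= 0:
--             minus.append(i)
--         elif i == 1:
--             res += 1
--         else:
--             plus.append(i)
--
--     plus.sort(reverse=True)
--     minus.sort()
--     for p in range(0, len(plus), 2):
--         if p+1 >= len(plus):
--             res += plus[p]
--         else:
--             res += plus[p] * plus[p+1]
--
--     for m in range(0, len(minus), 2):
--         if m+1 >= len(minus):
--             res += minus[m]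
--         else:
--             res += minus[m] * minus[m+1]
--
--     return res
-- ===== SOURCE B (Python) =====
-- def mod_num(lst):
--     s = sorted(lst)
--     n = len(s)
--     res = 0
--     i, j = 0, n - 1
--     # pair non-positive numbers from the small end
--     while i + 1 < n and s[i + 1] <= 0:
--         res += s[i] * s[i + 1]
--         i += 2
--     if i < n and s[i] <= 0:
--         res += s[i]
--         i += 1
--     # pair numbers greater than 1 from the large end
--     while j - 1 >= i and s[j - 1] > 1:
--         res += s[j] * s[j - 1]
--         j -= 2
--     if j >= i and s[j] > 1:
--         res += s[j]
--         j -= 1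
--     # everything between i and j equals 1
--     return res + (j - i + 1)
-- ===== Notes on version B (the rewrite author's own statement) =====
-- stated objective: idiomatic
-- what changed: Replaces A's three-bucket partition with two separate sorts and two stepped index loops by a single sort of the whole list followed by a two-ended sweep: pair non-positives from the small end, pair >1 values from the large end, count the 1s left in the middle.
import Mathlib
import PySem

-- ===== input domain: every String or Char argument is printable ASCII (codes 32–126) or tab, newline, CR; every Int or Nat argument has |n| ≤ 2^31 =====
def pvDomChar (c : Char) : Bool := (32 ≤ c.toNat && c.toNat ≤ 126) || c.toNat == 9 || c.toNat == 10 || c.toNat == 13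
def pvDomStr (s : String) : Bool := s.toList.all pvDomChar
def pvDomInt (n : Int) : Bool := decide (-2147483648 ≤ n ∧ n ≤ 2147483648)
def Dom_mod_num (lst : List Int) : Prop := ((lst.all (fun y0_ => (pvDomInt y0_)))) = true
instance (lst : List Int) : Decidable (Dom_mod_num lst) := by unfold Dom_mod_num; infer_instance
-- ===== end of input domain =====

-- B replaces A's three-bucket partition + two stepped index loops by one sort of the whole
-- list and a two-ended pairing sweep (objective: idiomatic; same asymptotic cost).

-- ===== PORT A =====
def mod_num (lst : List Int) : Int :=
  -- the for-loop filling minus / plus / res, state (minus, plus, res)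
  let st := lst.foldl (fun (st : List Int × List Int × Int) i =>
    if i ≤ 0 then (st.1 ++ [i], st.2.1, st.2.2)
    else if i = 1 then (st.1, st.2.1, st.2.2 + 1)
    else (st.1, st.2.1 ++ [i], st.2.2)) ([], [], 0)
  let plus := PySem.List.sorted st.2.1 (fun x => x) true
  let minus := PySem.List.sorted st.1 (fun x => x)
  let res1 := (PySem.List.pyRange 0 (plus.length : Int) 2).foldl (fun res p =>
    if p + 1 ≥ (plus.length : Int) then res + PySem.List.pyGetD plus p 0
    else res + PySem.List.pyGetD plus p 0 * PySem.List.pyGetD plus (p + 1) 0) st.2.2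
  (PySem.List.pyRange 0 (minus.length : Int) 2).foldl (fun res m =>
    if m + 1 ≥ (minus.length : Int) then res + PySem.List.pyGetD minus m 0
    else res + PySem.List.pyGetD minus m 0 * PySem.List.pyGetD minus (m + 1) 0) res1

-- ===== PORT B =====
-- the `while i + 1 < n and s[i + 1] <= 0` loop of Source B
def pvLoopNeg (s : List Int) (n res i : Int) : Int × Int :=
  if h : i + 1 < n ∧ PySem.List.pyGetD s (i + 1) 0 ≤ 0 then
    pvLoopNeg s n (res + PySem.List.pyGetD s i 0 * PySem.List.pyGetD s (i + 1) 0) (i + 2)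
  else (res, i)
termination_by (n - i).toNat
decreasing_by omega

-- the `while j - 1 >= i and s[j - 1] > 1` loop of Source B
def pvLoopPos (s : List Int) (i res j : Int) : Int × Int :=
  if h : j - 1 ≥ i ∧ 1 < PySem.List.pyGetD s (j - 1) 0 then
    pvLoopPos s i (res + PySem.List.pyGetD s j 0 * PySem.List.pyGetD s (j - 1) 0) (j - 2)
  else (res, j)
termination_by (j + 1 - i).toNat
decreasing_by omega

def mod_num_alt (lst : List Int) : Int :=
  let s := PySem.List.sorted lst (fun x => x)
  let n : Int := (s.length : Int)
  let p1 := pvLoopNeg s n 0 0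
  let p2 := if p1.2 < n ∧ PySem.List.pyGetD s p1.2 0 ≤ 0
    then (p1.1 + PySem.List.pyGetD s p1.2 0, p1.2 + 1) else p1
  let p3 := pvLoopPos s p2.2 p2.1 (n - 1)
  let p4 := if p3.2 ≥ p2.2 ∧ 1 < PySem.List.pyGetD s p3.2 0
    then (p3.1 + PySem.List.pyGetD s p3.2 0, p3.2 - 1) else p3
  p4.1 + (p4.2 - p2.2 + 1)

-- ===== PRECONDITION & SPEC =====
def Spec_mod_num (lst : List Int) (out : Int) : Prop := out = mod_num_alt lst
instance (lst : List Int) (out : Int) : Decidable (Spec_mod_num lst out) := by unfold Spec_mod_num; infer_instance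

-- ===== CLAIM (what is proved, stated in full; the proofs are below) =====
def Claim_equal_mod_num : Prop := ∀ (lst : List Int), Dom_mod_num lst → Spec_mod_num lst (mod_num lst)

-- ===== LEMMAS AND PROOFS =====

/-- Adjacent pairing sum: pair up neighbours, a lone leftover counts alone. -/
def pairSum : List Int → Int
  | [] => 0
  | [a] => a
  | a :: b :: t => a * b + pairSum t

-- peel the first index off `range(0, N, 2)` and shift the rest by 2
theorem pyRange_two_step (N : Int) (h : 2 ≤ N) :
    PySem.List.pyRange 0 N 2 = 0 :: (PySem.List.pyRange 0 (N - 2) 2).map (· + 2) := by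
  rw [PySem.List.pyRange_of_pos _ _ (by norm_num : (0:Int) < 2),
      PySem.List.pyRange_of_pos _ _ (by norm_num : (0:Int) < 2)]
  have h1 : (if (0:Int) < N then ((N - 0 + 2 - 1) / 2).toNat else 0)
      = (if (0:Int) < N - 2 then ((N - 2 - 0 + 2 - 1) / 2).toNat else 0) + 1 := by
    split_ifs <;> omega
  rw [h1, List.range_succ_eq_map, List.map_cons, List.map_map, List.map_map]
  congr 1

theorem pyGetD_cons_cons (a b d : Int) (t : List Int) (k : Int) (hk : 0 ≤ k) :
    PySem.List.pyGetD (a :: b :: t) (k + 2) d = PySem.List.pyGetD t k d := by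
  rw [PySem.List.pyGetD_of_nonneg _ _ (by omega), PySem.List.pyGetD_of_nonneg _ _ hk]
  have : (k + 2).toNat = k.toNat + 2 := by omega
  rw [this]
  rfl

-- A's stepped index loop over a list computes the adjacent pairing sum
theorem loopA (l : List Int) (res : Int) :
    (PySem.List.pyRange 0 (l.length : Int) 2).foldl (fun res p =>
      if p + 1 ≥ (l.length : Int) then res + PySem.List.pyGetD l p 0
      else res + PySem.List.pyGetD l p 0 * PySem.List.pyGetD l (p + 1) 0) res
    = res + pairSum l := by
  induction l using pairSum.induct generalizing res with
  | case1 =>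
      have h0 : PySem.List.pyRange 0 ((([] : List Int).length : Nat) : Int) 2 = [] := by decide
      rw [h0]
      simp [pairSum]
  | case2 a =>
      have hl : ((([a] : List Int).length : Nat) : Int) = 1 := by simp
      rw [hl, (by decide : PySem.List.pyRange 0 (1:Int) 2 = [0])]
      simp [pairSum, PySem.List.pyGetD_of_nonneg]
  | case3 a b t ih =>
      have hlen : (((a :: b :: t).length : Nat) : Int) = (t.length : Int) + 2 := by
        simp; omega
      rw [hlen, pyRange_two_step _ (by omega)]
      have hsub : (t.length : Int) + 2 - 2 = (t.length : Int) := by ring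
      rw [hsub, List.foldl_cons, List.foldl_map]
      have hfirst : (if (0:Int) + 1 ≥ (t.length : Int) + 2 then res + PySem.List.pyGetD (a :: b :: t) 0 0
          else res + PySem.List.pyGetD (a :: b :: t) 0 0 * PySem.List.pyGetD (a :: b :: t) (0 + 1) 0)
          = res + a * b := by
        rw [if_neg (by omega)]
        norm_num [PySem.List.pyGetD_of_nonneg]
      rw [hfirst]
      rw [PySem.List.foldl_congr_mem _ _ (fun res p =>
          if p + 1 ≥ (t.length : Int) then res + PySem.List.pyGetD t p 0
          else res + PySem.List.pyGetD t p 0 * PySem.List.pyGetD t (p + 1) 0) _ ?_]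
      · rw [ih]
        simp only [pairSum]
        ring
      · intro acc x hx
        have hx0 : 0 ≤ x := ((PySem.List.mem_pyRange_iff_of_pos (by norm_num) x).1 hx).1
        have e1 : PySem.List.pyGetD (a :: b :: t) (x + 2) 0 = PySem.List.pyGetD t x 0 :=
          pyGetD_cons_cons a b 0 t x hx0
        have e2 : PySem.List.pyGetD (a :: b :: t) (x + 2 + 1) 0 = PySem.List.pyGetD t (x + 1) 0 := by
          have h21 : x + 2 + 1 = (x + 1) + 2 := by ring
          rw [h21]
          exact pyGetD_cons_cons a b 0 t (x + 1) (by omega)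
        have hiff : (x + 2 + 1 ≥ (t.length : Int) + 2) ↔ (x + 1 ≥ (t.length : Int)) := by omega
        rw [if_congr hiff (by rw [e1]) (by rw [e1, e2])]

-- descending sort is the reverse of the ascending sort (Int values)
theorem sorted_rev_eq_reverse (xs : List Int) :
    PySem.List.sorted xs (fun x => x) true = (PySem.List.sorted xs (fun x => x)).reverse := by
  apply List.Perm.eq_of_pairwise (le := fun a b : Int => b ≤ a)
  · intro a b _ _ h1 h2
    omega
  · exact PySem.List.sorted_pairwise_rev xs (fun x => x)
  · exact List.pairwise_reverse.mpr (PySem.List.sorted_pairwise xs (fun x => x))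
  · exact (PySem.List.sorted_perm xs (fun x => x) true).trans
      ((PySem.List.sorted_perm xs (fun x => x) false).symm.trans (List.reverse_perm _).symm)

theorem pairwise_le_of_all_one (l : List Int) (h : ∀ x ∈ l, x = 1) :
    List.Pairwise (fun a b : Int => a ≤ b) l := by
  induction l with
  | nil => exact List.Pairwise.nil
  | cons a t ih =>
      refine List.Pairwise.cons ?_ (ih fun x hx => h x (List.mem_cons_of_mem a hx))
      intro b hb
      have h1 := h a (by simp)
      have h2 := h b (List.mem_cons_of_mem a hb)
      omega

-- the sorted list splits as (sorted non-positives) ++ (the ones) ++ (sorted > 1)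
theorem sorted_decomp (lst : List Int) :
    PySem.List.sorted lst (fun x => x) =
      PySem.List.sorted (lst.filter (fun i => decide (i ≤ 0))) (fun x => x)
      ++ lst.filter (fun i => decide (i = 1))
      ++ PySem.List.sorted (lst.filter (fun i => decide (1 < i))) (fun x => x) := by
  apply PySem.List.sorted_id_eq_of_perm_of_pairwise
  · -- permutation with lst
    have h1 : List.filter (fun i => decide (i = 1)) (lst.filter (fun i => !decide (i ≤ 0)))
        = lst.filter (fun i => decide (i = 1)) := by
      rw [List.filter_filter]
      refine List.filter_congr ?_
      intro x _
      by_cases hx : x = 1 <;> simp [hx]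
    have h2 : List.filter (fun i => !decide (i = 1)) (lst.filter (fun i => !decide (i ≤ 0)))
        = lst.filter (fun i => decide (1 < i)) := by
      rw [List.filter_filter]
      refine List.filter_congr ?_
      intro x _
      by_cases hx : 1 < x <;> simp [hx] <;> omega
    have hmid : (lst.filter (fun i => decide (i = 1))
        ++ lst.filter (fun i => decide (1 < i))).Perm
        (lst.filter (fun i => !decide (i ≤ 0))) := by
      rw [← h1, ← h2]
      exact List.filter_append_perm _ _
    have step1 : (PySem.List.sorted (lst.filter (fun i => decide (i ≤ 0))) (fun x => x)
        ++ lst.filter (fun i => decide (i = 1))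
        ++ PySem.List.sorted (lst.filter (fun i => decide (1 < i))) (fun x => x)).Perm
        (lst.filter (fun i => decide (i ≤ 0))
          ++ (lst.filter (fun i => decide (i = 1)) ++ lst.filter (fun i => decide (1 < i)))) := by
      rw [List.append_assoc]
      exact (PySem.List.sorted_perm _ _ _).append
        ((List.Perm.refl _).append (PySem.List.sorted_perm _ _ _))
    exact step1.trans (((List.Perm.refl _).append hmid).trans (List.filter_append_perm _ _))
  · -- pairwise ≤
    have hneg : ∀ x ∈ PySem.List.sorted (lst.filter (fun i => decide (i ≤ 0))) (fun x => x), x ≤ 0 := by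
      intro x hx
      have hm := (PySem.List.mem_sorted _ _ _ x).1 hx
      simpa using (List.mem_filter.1 hm).2
    have hone : ∀ x ∈ lst.filter (fun i => decide (i = 1)), x = 1 := by
      intro x hx
      simpa using (List.mem_filter.1 hx).2
    have hpos : ∀ x ∈ PySem.List.sorted (lst.filter (fun i => decide (1 < i))) (fun x => x), 1 < x := by
      intro x hx
      have hm := (PySem.List.mem_sorted _ _ _ x).1 hx
      simpa using (List.mem_filter.1 hm).2
    rw [List.append_assoc, List.pairwise_append]
    refine ⟨PySem.List.sorted_pairwise _ (fun x => x), ?_, ?_⟩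
    · rw [List.pairwise_append]
      refine ⟨pairwise_le_of_all_one _ hone, PySem.List.sorted_pairwise _ (fun x => x), ?_⟩
      intro a ha b hb
      have := hone a ha
      have := hpos b hb
      omega
    · intro a ha b hb
      have ha0 := hneg a ha
      rcases List.mem_append.1 hb with hb | hb
      · have := hone b hb
        omega
      · have := hpos b hb
        omega

-- proof-only reformulations of the two "if" steps of mod_num_alt
def stepNegIdx (s : List Int) (n : Int) (p : Int × Int) : Int × Int :=
  if p.2 < n ∧ PySem.List.pyGetD s p.2 0 ≤ 0
  then (p.1 + PySem.List.pyGetD s p.2 0, p.2 + 1) else p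

def stepPosIdx (s : List Int) (i : Int) (p : Int × Int) : Int × Int :=
  if p.2 ≥ i ∧ 1 < PySem.List.pyGetD s p.2 0
  then (p.1 + PySem.List.pyGetD s p.2 0, p.2 - 1) else p

def altP2 (s : List Int) (n : Int) : Int × Int := stepNegIdx s n (pvLoopNeg s n 0 0)

def altP4 (s : List Int) (n : Int) : Int × Int :=
  stepPosIdx s (altP2 s n).2 (pvLoopPos s (altP2 s n).2 (altP2 s n).1 (n - 1))

theorem mod_num_alt_eq (lst : List Int) :
    mod_num_alt lst =
      (altP4 (PySem.List.sorted lst (fun x => x))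
          (((PySem.List.sorted lst (fun x => x)).length : Nat) : Int)).1
      + ((altP4 (PySem.List.sorted lst (fun x => x))
          (((PySem.List.sorted lst (fun x => x)).length : Nat) : Int)).2
        - (altP2 (PySem.List.sorted lst (fun x => x))
          (((PySem.List.sorted lst (fun x => x)).length : Nat) : Int)).2 + 1) := rfl

theorem pyGetD_append_off (pre l : List Int) (k d : Int) (hk : 0 ≤ k) :
    PySem.List.pyGetD (pre ++ l) ((pre.length : Int) + k) d = PySem.List.pyGetD l k d := by
  rw [PySem.List.pyGetD_of_nonneg _ _ (by omega), PySem.List.pyGetD_of_nonneg _ _ hk]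
  have ht : ((pre.length : Int) + k).toNat = pre.length + k.toNat := by omega
  rw [ht]
  simp [List.getD, List.getElem?_append_right]

theorem pyGetD_mem_one (ones tail : List Int) (k d : Int) (h0 : 0 ≤ k)
    (hk : k < (ones.length : Int)) (hone : ∀ x ∈ ones, x = 1) :
    PySem.List.pyGetD (ones ++ tail) k d = 1 := by
  rw [PySem.List.pyGetD_of_nonneg _ _ h0]
  have hlt : k.toNat < ones.length := by omega
  rw [List.getD_eq_getElem?_getD, List.getElem?_append_left hlt]
  rw [List.getElem?_eq_getElem hlt]
  exact hone _ (List.getElem_mem hlt)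

-- the left sweep of B consumes exactly the non-positive prefix, pairing adjacently
theorem negIdx (neg : List Int) : ∀ (pre rest : List Int) (res : Int),
    (∀ x ∈ neg, x ≤ 0) → (∀ x ∈ rest, 0 < x) →
    stepNegIdx (pre ++ neg ++ rest) ((pre ++ neg ++ rest).length : Int)
      (pvLoopNeg (pre ++ neg ++ rest) ((pre ++ neg ++ rest).length : Int) res (pre.length : Int))
    = (res + pairSum neg, (pre.length : Int) + (neg.length : Int)) := by
  induction neg using pairSum.induct with
  | case1 =>
      intro pre rest res _ hrest
      simp only [List.append_nil, List.length_nil, Nat.cast_zero, add_zero, pairSum]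
      have hno : ¬ ((pre.length : Int) + 1 < ((pre ++ rest).length : Int)
          ∧ PySem.List.pyGetD (pre ++ rest) ((pre.length : Int) + 1) 0 ≤ 0) := by
        rintro ⟨hlt, hle⟩
        have hlen : ((pre ++ rest).length : Int) = (pre.length : Int) + (rest.length : Int) := by
          simp
        rw [pyGetD_append_off _ _ _ _ (by omega)] at hle
        have h2 : 2 ≤ (rest.length : Int) := by omega
        match rest, h2 with
        | r1 :: r2 :: t, _ =>
            have := hrest r2 (by simp)
            have hg : PySem.List.pyGetD (r1 :: r2 :: t) 1 0 = r2 := by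
              rw [PySem.List.pyGetD_of_nonneg _ _ (by omega)]; rfl
            omega
      rw [pvLoopNeg, dif_neg hno]
      have hno2 : ¬ ((pre.length : Int) < ((pre ++ rest).length : Int)
          ∧ PySem.List.pyGetD (pre ++ rest) (pre.length : Int) 0 ≤ 0) := by
        rintro ⟨hlt, hle⟩
        have : PySem.List.pyGetD (pre ++ rest) ((pre.length : Int) + 0) 0 ≤ 0 := by
          simpa using hle
        rw [pyGetD_append_off _ _ _ _ le_rfl] at this
        have h1 : 1 ≤ (rest.length : Int) := by simp at hlt ⊢; omega
        match rest, h1 with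
        | r1 :: t, _ =>
            have := hrest r1 (by simp)
            have hg : PySem.List.pyGetD (r1 :: t) 0 0 = r1 := by
              rw [PySem.List.pyGetD_of_nonneg _ _ le_rfl]; rfl
            omega
      simp only [stepNegIdx]
      rw [if_neg hno2]
  | case2 a =>
      intro pre rest res hneg hrest
      have ha : a ≤ 0 := hneg a (by simp)
      have hs : pre ++ [a] ++ rest = pre ++ (a :: rest) := by simp
      rw [hs]
      have hga : PySem.List.pyGetD (pre ++ (a :: rest)) ((pre.length : Int) + 0) 0 = a := by
        rw [pyGetD_append_off _ _ _ _ le_rfl]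
        rw [PySem.List.pyGetD_of_nonneg _ _ le_rfl]; rfl
      simp only [add_zero] at hga
      have hno : ¬ ((pre.length : Int) + 1 < ((pre ++ (a :: rest)).length : Int)
          ∧ PySem.List.pyGetD (pre ++ (a :: rest)) ((pre.length : Int) + 1) 0 ≤ 0) := by
        rintro ⟨hlt, hle⟩
        rw [pyGetD_append_off _ _ _ _ (by omega)] at hle
        have h1 : 1 ≤ (rest.length : Int) := by simp at hlt ⊢; omega
        match rest, h1 with
        | r1 :: t, _ =>
            have := hrest r1 (by simp)
            have hg : PySem.List.pyGetD (a :: r1 :: t) 1 0 = r1 := by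
              rw [PySem.List.pyGetD_of_nonneg _ _ (by omega)]; rfl
            omega
      rw [pvLoopNeg, dif_neg hno]
      have hyes : ((pre.length : Int) < ((pre ++ (a :: rest)).length : Int)
          ∧ PySem.List.pyGetD (pre ++ (a :: rest)) (pre.length : Int) 0 ≤ 0) := by
        constructor
        · have hl : (pre ++ (a :: rest)).length = pre.length + (rest.length + 1) := by simp
          omega
        · rw [hga]; exact ha
      simp only [stepNegIdx]
      rw [if_pos hyes, hga]
      simp [pairSum]
  | case3 a b t ih =>
      intro pre rest res hneg hrest
      have hb : b ≤ 0 := hneg b (by simp)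
      have hs : pre ++ (a :: b :: t) ++ rest = pre ++ (a :: b :: (t ++ rest)) := by simp
      rw [hs]
      have hga : PySem.List.pyGetD (pre ++ (a :: b :: (t ++ rest))) ((pre.length : Int) + 0) 0 = a := by
        rw [pyGetD_append_off _ _ _ _ le_rfl]
        rw [PySem.List.pyGetD_of_nonneg _ _ le_rfl]; rfl
      simp only [add_zero] at hga
      have hgb : PySem.List.pyGetD (pre ++ (a :: b :: (t ++ rest))) ((pre.length : Int) + 1) 0 = b := by
        rw [pyGetD_append_off _ _ _ _ (by omega)]
        rw [PySem.List.pyGetD_of_nonneg _ _ (by omega)]; rfl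
      have hyes : ((pre.length : Int) + 1 < ((pre ++ (a :: b :: (t ++ rest))).length : Int)
          ∧ PySem.List.pyGetD (pre ++ (a :: b :: (t ++ rest))) ((pre.length : Int) + 1) 0 ≤ 0) := by
        constructor
        · have hl : (pre ++ (a :: b :: (t ++ rest))).length
              = pre.length + (t.length + rest.length + 2) := by simp
          omega
        · rw [hgb]; exact hb
      rw [pvLoopNeg, dif_pos hyes, hga, hgb]
      have hre : pre ++ (a :: b :: (t ++ rest)) = (pre ++ [a, b]) ++ t ++ rest := by simp
      have hlen2 : (pre.length : Int) + 2 = (((pre ++ [a, b]).length : Nat) : Int) := by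
        push_cast [List.length_append, List.length_cons, List.length_nil]
        ring
      rw [hre, hlen2, ih (pre ++ [a, b]) rest (res + a * b)
        (fun x hx => hneg x (by simp [hx])) hrest]
      simp only [pairSum, List.length_append, List.length_cons, Prod.mk.injEq]
      refine ⟨by ring, by push_cast [List.length_nil]; ring⟩

-- the right sweep of B consumes exactly the >1 suffix, pairing from the top
theorem posIdx (q : List Int) : ∀ (neg ones high : List Int) (res : Int),
    (∀ x ∈ ones, x = 1) → (∀ x ∈ q, 1 < x) →
    stepPosIdx ((neg ++ ones) ++ q.reverse ++ high) (neg.length : Int)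
      (pvLoopPos ((neg ++ ones) ++ q.reverse ++ high) (neg.length : Int) res
        ((neg.length : Int) + (ones.length : Int) + (q.length : Int) - 1))
    = (res + pairSum q, (neg.length : Int) + (ones.length : Int) - 1) := by
  induction q using pairSum.induct with
  | case1 =>
      intro neg ones high res hone _
      simp only [List.reverse_nil, List.nil_append, List.length_nil, Nat.cast_zero,
        add_zero, pairSum, List.append_assoc]
      have hread : ∀ k : Int, 0 ≤ k → k < (ones.length : Int) →
          PySem.List.pyGetD (neg ++ (ones ++ high)) ((neg.length : Int) + k) 0 = 1 := by
        intro k h0 hk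
        rw [pyGetD_append_off _ _ _ _ h0]
        exact pyGetD_mem_one _ _ _ _ h0 hk hone
      have hno : ¬ ((neg.length : Int) + (ones.length : Int) - 1 - 1 ≥ (neg.length : Int)
          ∧ 1 < PySem.List.pyGetD (neg ++ (ones ++ high))
              ((neg.length : Int) + (ones.length : Int) - 1 - 1) 0) := by
        rintro ⟨hge, hgt⟩
        have hk2 : (neg.length : Int) + (ones.length : Int) - 1 - 1
            = (neg.length : Int) + ((ones.length : Int) - 2) := by ring
        rw [hk2, hread _ (by omega) (by omega)] at hgt
        omega
      rw [pvLoopPos, dif_neg hno]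
      have hno2 : ¬ ((neg.length : Int) + (ones.length : Int) - 1 ≥ (neg.length : Int)
          ∧ 1 < PySem.List.pyGetD (neg ++ (ones ++ high))
              ((neg.length : Int) + (ones.length : Int) - 1) 0) := by
        rintro ⟨hge, hgt⟩
        have hk1 : (neg.length : Int) + (ones.length : Int) - 1
            = (neg.length : Int) + ((ones.length : Int) - 1) := by ring
        rw [hk1, hread _ (by omega) (by omega)] at hgt
        omega
      simp only [stepPosIdx]
      rw [if_neg hno2]
  | case2 a =>
      intro neg ones high res hone hq
      have ha : 1 < a := hq a (by simp)
      simp only [List.reverse_cons, List.reverse_nil, List.nil_append, pairSum]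
      have hs : (neg ++ ones) ++ [a] ++ high = neg ++ (ones ++ (a :: high)) := by simp
      rw [hs]
      have hl1 : (([a] : List Int).length : Int) = 1 := by simp
      rw [hl1]
      have hread : ∀ k : Int, 0 ≤ k → k < (ones.length : Int) →
          PySem.List.pyGetD (neg ++ (ones ++ (a :: high))) ((neg.length : Int) + k) 0 = 1 := by
        intro k h0 hk
        rw [pyGetD_append_off _ _ _ _ h0]
        exact pyGetD_mem_one _ _ _ _ h0 hk hone
      have hga : PySem.List.pyGetD (neg ++ (ones ++ (a :: high)))
          ((neg.length : Int) + (ones.length : Int) + 1 - 1) 0 = a := by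
        have hk : (neg.length : Int) + (ones.length : Int) + 1 - 1
            = (neg.length : Int) + (ones.length : Int) := by ring
        rw [hk]
        have hoff : (neg.length : Int) + (ones.length : Int)
            = (((neg ++ ones).length : Nat) : Int) + 0 := by simp
        rw [hoff, ← List.append_assoc, pyGetD_append_off _ _ _ _ le_rfl]
        rw [PySem.List.pyGetD_of_nonneg _ _ le_rfl]; rfl
      have hno : ¬ ((neg.length : Int) + (ones.length : Int) + 1 - 1 - 1 ≥ (neg.length : Int)
          ∧ 1 < PySem.List.pyGetD (neg ++ (ones ++ (a :: high)))
              ((neg.length : Int) + (ones.length : Int) + 1 - 1 - 1) 0) := by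
        rintro ⟨hge, hgt⟩
        have hk : (neg.length : Int) + (ones.length : Int) + 1 - 1 - 1
            = (neg.length : Int) + ((ones.length : Int) - 1) := by ring
        rw [hk, hread _ (by omega) (by omega)] at hgt
        omega
      rw [pvLoopPos, dif_neg hno]
      have hyes : ((neg.length : Int) + (ones.length : Int) + 1 - 1 ≥ (neg.length : Int)
          ∧ 1 < PySem.List.pyGetD (neg ++ (ones ++ (a :: high)))
              ((neg.length : Int) + (ones.length : Int) + 1 - 1) 0) := by
        refine ⟨by omega, ?_⟩
        rw [hga]; exact ha
      simp only [stepPosIdx]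
      rw [if_pos hyes, hga]
      have harith : (neg.length : Int) + (ones.length : Int) + 1 - 1 - 1
          = (neg.length : Int) + (ones.length : Int) - 1 := by ring
      rw [harith]
  | case3 a b t ih =>
      intro neg ones high res hone hq
      have ha : 1 < a := hq a (by simp)
      have hb : 1 < b := hq b (by simp)
      have hs : (neg ++ ones) ++ (a :: b :: t).reverse ++ high
          = (neg ++ ones) ++ t.reverse ++ (b :: a :: high) := by simp
      rw [hs]
      have hpre : (((((neg ++ ones) ++ t.reverse).length : Nat)) : Int)
          = (neg.length : Int) + (ones.length : Int) + (t.length : Int) := by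
        push_cast [List.length_append, List.length_reverse]
        ring
      have hgb : PySem.List.pyGetD ((neg ++ ones) ++ t.reverse ++ (b :: a :: high))
          ((neg.length : Int) + (ones.length : Int) + ((t.length : Int) + 2) - 1 - 1) 0 = b := by
        have hk : (neg.length : Int) + (ones.length : Int) + ((t.length : Int) + 2) - 1 - 1
            = ((((neg ++ ones) ++ t.reverse).length : Nat) : Int) + 0 := by rw [hpre]; ring
        rw [hk, List.append_assoc, ← List.append_assoc, pyGetD_append_off _ _ _ _ le_rfl]
        rw [PySem.List.pyGetD_of_nonneg _ _ le_rfl]; rfl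
      have hga : PySem.List.pyGetD ((neg ++ ones) ++ t.reverse ++ (b :: a :: high))
          ((neg.length : Int) + (ones.length : Int) + ((t.length : Int) + 2) - 1) 0 = a := by
        have hk : (neg.length : Int) + (ones.length : Int) + ((t.length : Int) + 2) - 1
            = ((((neg ++ ones) ++ t.reverse).length : Nat) : Int) + 1 := by rw [hpre]; ring
        rw [hk, List.append_assoc, ← List.append_assoc, pyGetD_append_off _ _ _ _ (by omega)]
        rw [PySem.List.pyGetD_of_nonneg _ _ (by omega)]; rfl
      have hlen : ((a :: b :: t).length : Int) = (t.length : Int) + 2 := by simp; omega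
      rw [hlen]
      have hyes : ((neg.length : Int) + (ones.length : Int) + ((t.length : Int) + 2) - 1 - 1
            ≥ (neg.length : Int)
          ∧ 1 < PySem.List.pyGetD ((neg ++ ones) ++ t.reverse ++ (b :: a :: high))
              ((neg.length : Int) + (ones.length : Int) + ((t.length : Int) + 2) - 1 - 1) 0) := by
        refine ⟨by omega, ?_⟩
        rw [hgb]; exact hb
      rw [pvLoopPos, dif_pos hyes, hga, hgb]
      have harg : (neg.length : Int) + (ones.length : Int) + ((t.length : Int) + 2) - 1 - 2
          = (neg.length : Int) + (ones.length : Int) + (t.length : Int) - 1 := by ring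
      rw [harg, ih neg ones (b :: a :: high) (res + a * b) hone
        (fun x hx => hq x (by simp [hx]))]
      simp only [pairSum]
      have harith : res + a * b + pairSum t = res + (a * b + pairSum t) := by ring
      rw [harith]

-- A's partition loop builds the three filters
theorem foldA (lst : List Int) (m p : List Int) (r : Int) :
    lst.foldl (fun (st : List Int × List Int × Int) i =>
      if i ≤ 0 then (st.1 ++ [i], st.2.1, st.2.2)
      else if i = 1 then (st.1, st.2.1, st.2.2 + 1)
      else (st.1, st.2.1 ++ [i], st.2.2)) (m, p, r)
    = (m ++ lst.filter (fun i => decide (i ≤ 0)),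
       p ++ lst.filter (fun i => decide (1 < i)),
       r + ((lst.filter (fun i => decide (i = 1))).length : Int)) := by
  induction lst generalizing m p r with
  | nil => simp
  | cons i t ih =>
      simp only [List.foldl_cons, List.filter_cons]
      by_cases h1 : i ≤ 0
      · have h2 : ¬ i = 1 := by omega
        have h3 : ¬ 1 < i := by omega
        simp [h1, h2, h3, ih]
      · by_cases h2 : i = 1
        · simp [h2, ih]
          omega
        · have h3 : 1 < i := by omega
          simp [h1, h2, h3, ih]

theorem mod_num_spec : Claim_equal_mod_num := by
  intro lst _
  unfold Spec_mod_num
  set neg := PySem.List.sorted (lst.filter (fun i => decide (i ≤ 0))) (fun x => x) with hnegdef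
  set ones := lst.filter (fun i => decide (i = 1)) with honesdef
  set pos := PySem.List.sorted (lst.filter (fun i => decide (1 < i))) (fun x => x) with hposdef
  have hnegle : ∀ x ∈ neg, x ≤ 0 := by
    intro x hx
    have hm := (PySem.List.mem_sorted _ _ _ x).1 hx
    simpa using (List.mem_filter.1 hm).2
  have honeeq : ∀ x ∈ ones, x = 1 := by
    intro x hx
    simpa using (List.mem_filter.1 hx).2
  have hposgt : ∀ x ∈ pos, 1 < x := by
    intro x hx
    have hm := (PySem.List.mem_sorted _ _ _ x).1 hx
    simpa using (List.mem_filter.1 hm).2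
  -- value of A
  have hA : mod_num lst = (ones.length : Int) + pairSum (pos.reverse) + pairSum neg := by
    unfold mod_num
    rw [foldA]
    simp only [List.nil_append, zero_add]
    rw [sorted_rev_eq_reverse, ← hnegdef, ← honesdef, ← hposdef, loopA, loopA]
  -- value of B
  have hrest1 : ∀ x ∈ ones ++ pos, 0 < x := by
    intro x hx
    rcases List.mem_append.1 hx with h | h
    · have := honeeq x h; omega
    · have := hposgt x h; omega
  have hB : mod_num_alt lst = pairSum neg + pairSum (pos.reverse) + (ones.length : Int) := by
    rw [mod_num_alt_eq, sorted_decomp, ← hnegdef, ← honesdef, ← hposdef]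
    simp only [List.append_assoc]
    have e1 := negIdx neg [] (ones ++ pos) 0 hnegle hrest1
    simp only [List.nil_append, List.length_nil, Nat.cast_zero, zero_add] at e1
    have hp2 : altP2 (neg ++ (ones ++ pos)) ((neg ++ (ones ++ pos)).length : Int)
        = (pairSum neg, (neg.length : Int)) := by
      unfold altP2
      exact e1
    have e2 := posIdx pos.reverse neg ones [] (pairSum neg) honeeq
      (fun x hx => hposgt x (List.mem_reverse.1 hx))
    simp only [List.reverse_reverse, List.append_nil, List.length_reverse,
      List.append_assoc] at e2
    have hn : (((neg ++ (ones ++ pos)).length : Nat) : Int)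
        = (neg.length : Int) + (ones.length : Int) + (pos.length : Int) := by
      simp only [List.length_append]
      push_cast
      ring
    have hp4 : altP4 (neg ++ (ones ++ pos)) ((neg ++ (ones ++ pos)).length : Int)
        = (pairSum neg + pairSum (pos.reverse), (neg.length : Int) + (ones.length : Int) - 1) := by
      unfold altP4
      rw [hp2, hn]
      exact e2
    rw [hp4, hp2]
    show pairSum neg + pairSum (pos.reverse)
        + (((neg.length : Int) + (ones.length : Int) - 1) - (neg.length : Int) + 1)
      = pairSum neg + pairSum (pos.reverse) + (ones.length : Int)
    ring
  rw [hA, hB]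
  ring
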